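-- pv_equiv track=rewrite | github.com/tensorflow/lucid | lucid/optvis/param/resize_bilinear_nd.py | collapse_shape
-- ===== SOURCE A (Python) =====
-- def product(l):
--   """Multiply together the elements of a list."""
--   prod = 1
--   for x in l:
--     prod *= x
--   return prod
--
-- def collapse_shape(shape, a, b):
--   """Collapse `shape` outside the interval (`a`,`b`).
--
--   This function collapses `shape` outside the interval (`a`,`b`) by
--   multiplying the dimensions before `a` into a single dimension,
--   and mutliplying the dimensions after `b` into a single dimension.
--
--   Args:
--     shape: a tensor shape
--     a: integer, position in shape
--     b: integer, position in shape
--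
--   Returns:
--     The collapsed shape, represented as a list.
--
--   Examples:
--     [1, 2, 3, 4, 5], (a=0, b=2) => [1, 1, 2, 60]
--     [1, 2, 3, 4, 5], (a=1, b=3) => [1, 2, 3, 20]
--     [1, 2, 3, 4, 5], (a=2, b=4) => [2, 3, 4, 5 ]
--     [1, 2, 3, 4, 5], (a=3, b=5) => [6, 4, 5, 1 ]
--   """
--   shape = list(shape)
--   if a < 0:
--     n_pad = -a
--     pad = n_pad * [1]
--     return collapse_shape(pad + shape, a + n_pad, b + n_pad)
--   if b > len(shape):
--     n_pad = b - len(shape)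
--     pad = n_pad * [1]
--     return collapse_shape(shape + pad, a, b)
--   return [product(shape[:a])] + shape[a:b] + [product(shape[b:])]
-- ===== SOURCE B (Python) =====
-- def product(l):
--   """Multiply together the elements of a list."""
--   prod = 1
--   for x in l:
--     prod *= x
--   return prod
--
-- def collapse_shape(shape, a, b):
--   """Collapse `shape` outside the interval (`a`,`b`) — iterative padding, no recursion."""
--   shape = list(shape)
--   if a < 0:
--     shape = (-a) * [1] + shape
--     b += -a
--     a = 0
--   if b > len(shape):
--     shape = shape + (b - len(shape)) * [1]
--   return [product(shape[:a])] + shape[a:b] + [product(shape[b:])]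
-- ===== Notes on version B (the rewrite author's own statement) =====
-- stated objective: simpler
-- what changed: Replaced A's two-level tail recursion (which rebuilds padded lists and re-calls itself) by two straight-line guard blocks that pad in place and a single final slicing expression.
import Mathlib
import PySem

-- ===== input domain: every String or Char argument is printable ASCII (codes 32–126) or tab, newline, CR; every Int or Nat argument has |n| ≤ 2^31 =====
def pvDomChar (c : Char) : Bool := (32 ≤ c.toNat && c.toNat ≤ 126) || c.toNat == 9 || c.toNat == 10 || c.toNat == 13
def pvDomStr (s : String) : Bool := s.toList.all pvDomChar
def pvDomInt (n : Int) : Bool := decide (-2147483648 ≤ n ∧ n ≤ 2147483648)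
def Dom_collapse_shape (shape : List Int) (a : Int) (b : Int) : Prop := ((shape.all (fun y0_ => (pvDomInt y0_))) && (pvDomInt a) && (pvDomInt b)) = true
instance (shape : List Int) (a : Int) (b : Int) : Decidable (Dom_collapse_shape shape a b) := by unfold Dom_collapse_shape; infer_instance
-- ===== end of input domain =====

-- B replaces A's two-level tail recursion by two sequential padding guards and one final slicing expression (objective: simpler).

-- ===== PORT A =====
def pyproduct (l : List Int) : Int := l.foldl (fun prod x => prod * x) 1

def collapse_shape (shape : List Int) (a : Int) (b : Int) : List Int :=
  if _h1 : a < 0 then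
    let n_pad := -a
    let pad := List.replicate n_pad.toNat 1
    collapse_shape (pad ++ shape) (a + n_pad) (b + n_pad)
  else if _h2 : b > (shape.length : Int) then
    let n_pad := b - (shape.length : Int)
    let pad := List.replicate n_pad.toNat 1
    collapse_shape (shape ++ pad) a b
  else
    [pyproduct (PySem.List.slice shape none (some a))] ++
      PySem.List.slice shape (some a) (some b) ++
      [pyproduct (PySem.List.slice shape (some b) none)]
termination_by (if a < 0 then 1 else 0) + (if b > (shape.length : Int) then 1 else 0)
decreasing_by
  · simp only [_h1, if_pos]
    have : ¬ (a + -a < 0) := by omega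
    simp only [this, if_false]
    have hlen : ((List.replicate (-a).toNat (1:Int) ++ shape).length : Int)
        = (-a) + shape.length := by
      simp [List.length_append, List.length_replicate]; omega
    rw [hlen]
    by_cases hb : b > (shape.length : Int) <;> simp [hb]
  · have h1 : ¬ a < 0 := _h1
    simp only [h1, if_false, _h2, if_pos]
    have hlen : ((shape ++ List.replicate (b - (shape.length : Int)).toNat (1:Int)).length : Int)
        = b := by
      simp [List.length_append, List.length_replicate]; omega
    rw [hlen]
    simp

-- ===== PORT B =====
def collapse_shape_alt (shape : List Int) (a : Int) (b : Int) : List Int :=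
  -- first guard: a < 0 → prepend ones, shift b, set a = 0
  let s1 := if a < 0 then List.replicate (-a).toNat 1 ++ shape else shape
  let b1 := if a < 0 then b + -a else b
  let a1 := if a < 0 then (0 : Int) else a
  -- second guard: b1 > len → append ones
  let s2 := if b1 > (s1.length : Int) then s1 ++ List.replicate (b1 - (s1.length : Int)).toNat 1 else s1
  [pyproduct (PySem.List.slice s2 none (some a1))] ++
    PySem.List.slice s2 (some a1) (some b1) ++
    [pyproduct (PySem.List.slice s2 (some b1) none)]

-- ===== PRECONDITION & SPEC =====
def Spec_collapse_shape (shape : List Int) (a : Int) (b : Int) (out : List Int) : Prop := out = collapse_shape_alt shape a b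
instance (shape : List Int) (a : Int) (b : Int) (out : List Int) : Decidable (Spec_collapse_shape shape a b out) := by unfold Spec_collapse_shape; infer_instance

-- ===== CLAIM (what is proved, stated in full; the proofs are below) =====
def Claim_equal_collapse_shape : Prop := ∀ (shape : List Int) (a : Int) (b : Int), Dom_collapse_shape shape a b → Spec_collapse_shape shape a b (collapse_shape shape a b)

-- ===== LEMMAS AND PROOFS =====

-- ===== VERDICT (by name: the statement is the Claim_ definition above) =====
theorem len_pad_back (shape : List Int) (b : Int) (h : b > (shape.length : Int)) :
    ((shape ++ List.replicate (b - (shape.length : Int)).toNat (1:Int)).length : Int) = b := by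
  simp [List.length_append, List.length_replicate]; omega

theorem pvA_eq_B (shape : List Int) (a b : Int) :
    collapse_shape shape a b = collapse_shape_alt shape a b := by
  unfold collapse_shape_alt
  by_cases ha : a < 0
  · rw [collapse_shape.eq_def]
    simp only [dif_pos ha, if_pos ha]
    have hz : a + -a = 0 := by omega
    rw [hz, collapse_shape.eq_def]
    have h0 : ¬ ((0:Int) < 0) := by omega
    simp only [dif_neg h0]
    by_cases hb : b + -a > ((List.replicate (-a).toNat (1:Int) ++ shape).length : Int)
    · simp only [dif_pos hb, if_pos hb]
      rw [collapse_shape.eq_def]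
      have hb2 : ¬ (b + -a >
          (((List.replicate (-a).toNat (1:Int) ++ shape) ++
            List.replicate (b + -a - ((List.replicate (-a).toNat (1:Int) ++ shape).length : Int)).toNat (1:Int)).length : Int)) := by
        rw [len_pad_back _ _ hb]; omega
      simp only [dif_neg h0, dif_neg hb2]
    · simp only [dif_neg hb, if_neg hb]
  · simp only [if_neg ha]
    rw [collapse_shape.eq_def]
    simp only [dif_neg ha]
    by_cases hb : b > (shape.length : Int)
    · simp only [dif_pos hb, if_pos hb]
      rw [collapse_shape.eq_def]
      have hb2 : ¬ (b > ((shape ++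
          List.replicate (b - (shape.length : Int)).toNat (1:Int)).length : Int)) := by
        rw [len_pad_back _ _ hb]; omega
      simp only [dif_neg ha, dif_neg hb2]
    · simp only [dif_neg hb, if_neg hb]

theorem collapse_shape_spec : Claim_equal_collapse_shape := by
  intro shape a b _
  exact pvA_eq_B shape a b
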